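-- pv_equiv track=rewrite | github.com/OptimalScale/LMFlow | lm-evaluation-harness/tests/test_janitor.py | simple_ngram
-- ===== SOURCE A (Python) =====
-- def simple_ngram(sequence, n):
--     ngrams = list()
--     ngram = []
--     for x in sequence:
--         ngram.extend([x])
--         if len(ngram) == n:
--             ngrams.extend([tuple(ngram)])
--             ngram = ngram[1:]
--
--     return ngrams
-- ===== SOURCE B (Python) =====
-- def simple_ngram(sequence, n):
--     items = list(sequence)
--     n = min(n, len(items) + 1)  # more slices than items can never produce a column
--     return list(zip(*(items[i:] for i in range(n))))
-- ===== Notes on version B (the rewrite author's own statement) =====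
-- stated objective: idiomatic
-- what changed: Replaces A's sliding-buffer loop (append, test length, drop head) with the standard zip-of-offset-slices idiom: n (clamped to len+1, which cannot change the result) shifted views of the materialized sequence are zipped, each n-gram being one column.
import Mathlib
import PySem

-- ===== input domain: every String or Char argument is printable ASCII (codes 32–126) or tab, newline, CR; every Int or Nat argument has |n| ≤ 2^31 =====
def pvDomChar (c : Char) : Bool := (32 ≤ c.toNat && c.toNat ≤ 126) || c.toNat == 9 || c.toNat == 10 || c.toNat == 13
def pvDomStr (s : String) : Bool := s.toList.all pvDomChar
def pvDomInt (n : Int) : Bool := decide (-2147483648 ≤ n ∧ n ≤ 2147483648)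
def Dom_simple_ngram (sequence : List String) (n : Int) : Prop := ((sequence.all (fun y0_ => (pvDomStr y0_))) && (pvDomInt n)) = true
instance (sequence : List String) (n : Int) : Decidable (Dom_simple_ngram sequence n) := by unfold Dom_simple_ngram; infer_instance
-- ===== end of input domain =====

-- B replaces A's sliding-buffer loop with the idiomatic zip-of-offset-slices n-gram construction (objective: idiomatic; same cost).

-- ===== PORT A =====
-- state = (ngrams, ngram); each iteration appends x to ngram, and when len(ngram) == n
-- emits the ngram and drops its head (ngram = ngram[1:]).
def simple_ngram (sequence : List String) (n : Int) : List (List String) :=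
  (sequence.foldl
    (fun (st : List (List String) × List String) x =>
      let ngram := st.2 ++ [x]
      if (ngram.length : Int) = n then (st.1 ++ [ngram], ngram.drop 1) else (st.1, ngram))
    ([], [])).1

-- ===== PORT B =====
-- hand port of Python's n-ary zip over lists (exact: stops at the first exhausted list;
-- zip() of zero arguments yields []); the headD "" default is only read under the
-- all-nonempty guard, matching next() never raising there.
def pyZip1 {α : Type} (d : α) : List α → List (List α) → List (List α)
  | [], _ => []
  | x :: xs, rest =>
      if rest.all (fun l => !l.isEmpty) then
        (x :: rest.map (fun l => l.headD d)) :: pyZip1 d xs (rest.map List.tail)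
      else []

def pyZip {α : Type} (d : α) : List (List α) → List (List α)
  | [] => []
  | f :: rs => pyZip1 d f rs

-- n = min(n, len(items) + 1); list(zip(*(items[i:] for i in range(n))))
def simple_ngram_alt (sequence : List String) (n : Int) : List (List String) :=
  let items := sequence
  let n2 := min n ((items.length : Int) + 1)
  pyZip "" ((PySem.List.pyRange 0 n2 1).map (fun i => PySem.List.slice items (some i) none))

-- ===== PRECONDITION & SPEC =====
def Spec_simple_ngram (sequence : List String) (n : Int) (out : List (List String)) : Prop := out = simple_ngram_alt sequence n
instance (sequence : List String) (n : Int) (out : List (List String)) : Decidable (Spec_simple_ngram sequence n out) := by unfold Spec_simple_ngram; infer_instance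

-- ===== CLAIM (what is proved, stated in full; the proofs are below) =====
def Claim_equal_simple_ngram : Prop := ∀ (sequence : List String) (n : Int), Dom_simple_ngram sequence n → Spec_simple_ngram sequence n (simple_ngram sequence n)

-- ===== LEMMAS AND PROOFS =====

-- the common characterisation: all windows of length m, left to right
def tgt (m : Nat) (l : List String) : List (List String) :=
  (List.range (l.length + 1 - m)).map (fun i => (l.drop i).take m)

-- A-side: loop invariant, proved from the right end of the list
lemma A_state (m : Nat) (hm : 1 ≤ m) (l : List String) :
    l.foldl
      (fun (st : List (List String) × List String) x =>
        let ngram := st.2 ++ [x]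
        if (ngram.length : Int) = (m : Int) then (st.1 ++ [ngram], ngram.drop 1) else (st.1, ngram))
      ([], [])
    = (tgt m l, l.drop (l.length + 1 - m)) := by
  induction l using List.reverseRecOn with
  | nil =>
      simp [tgt]
      omega
  | append_singleton ys x ih =>
      rw [List.foldl_append, ih]
      simp only [List.foldl_cons, List.foldl_nil]
      by_cases h : ys.length + 1 ≥ m
      · have hlen : (ys.drop (ys.length + 1 - m) ++ [x]).length = m := by
          simp [List.length_drop]; omega
        rw [if_pos (by exact_mod_cast congrArg (Nat.cast : Nat → Int) hlen)]
        refine congrArg₂ Prod.mk ?_ ?_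
        · -- ngrams part
          show tgt m ys ++ [ys.drop (ys.length + 1 - m) ++ [x]] = tgt m (ys ++ [x])
          unfold tgt
          have hr : (ys ++ [x]).length + 1 - m = (ys.length + 1 - m) + 1 := by
            simp; omega
          rw [hr, List.range_succ, List.map_append]
          congr 1
          · apply List.map_congr_left
            intro i hi
            simp only [List.mem_range] at hi
            rw [List.drop_append_of_le_length (by omega)]
            rw [List.take_append_of_le_length (by simp [List.length_drop]; omega)]
          · simp only [List.map_cons, List.map_nil]
            congr 1
            rw [List.drop_append_of_le_length (by omega)]
            rw [List.take_of_length_le (by simp [List.length_drop]; omega)]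
        · -- buffer part
          show (ys.drop (ys.length + 1 - m) ++ [x]).drop 1 = (ys ++ [x]).drop ((ys ++ [x]).length + 1 - m)
          have hr : (ys ++ [x]).length + 1 - m = (ys.length + 1 - m) + 1 := by simp; omega
          rw [hr]
          by_cases h1 : m = 1
          · subst h1; simp
          · have e1 : (ys.drop (ys.length + 1 - m) ++ [x]).drop 1
                = ys.drop (ys.length + 2 - m) ++ [x] := by
              rw [List.drop_append_of_le_length (by simp; omega), List.drop_drop,
                show ys.length + 1 - m + 1 = ys.length + 2 - m from by omega]
            have e2 : (ys ++ [x]).drop ((ys.length + 1 - m) + 1)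
                = ys.drop (ys.length + 2 - m) ++ [x] := by
              rw [show (ys.length + 1 - m) + 1 = ys.length + 2 - m from by omega,
                List.drop_append_of_le_length (by omega)]
            rw [e1, e2]
      · -- buffer still shorter than m: nothing emitted
        have hl : ¬ ((ys.drop (ys.length + 1 - m) ++ [x]).length : Int) = (m : Int) := by
          simp [List.length_drop]; omega
        rw [if_neg hl]
        have h0 : ys.length + 1 - m = 0 := by omega
        have h0'' : ys.length + 1 + 1 - m = 0 := by omega
        unfold tgt
        simp [h0, h0'']

-- B-side: the offset slices are exactly the drops
lemma slices_eq_drops (l : List String) (m : Nat) :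
    (PySem.List.pyRange 0 (m : Int) 1).map (fun i => PySem.List.slice l (some i) none)
      = (List.range m).map (fun k => l.drop k) := by
  rw [PySem.List.pyRange_one]
  simp only [Int.sub_zero, Int.toNat_natCast, List.map_map]
  apply List.map_congr_left
  intro k hk
  simp only [Function.comp_apply, zero_add]
  exact PySem.List.slice_from_natCast l k

-- heads of the first m' drops of xs are its first m' elements
lemma heads_of_drops (xs : List String) (m' : Nat) (h : m' ≤ xs.length) :
    (List.range m').map (fun k => (xs.drop k).headD "") = xs.take m' := by
  induction m' with
  | zero => simp
  | succ k ih =>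
      rw [List.range_succ, List.map_append, ih (by omega)]
      have hk : k < xs.length := by omega
      rw [List.take_add_one]
      simp [List.head?_drop, List.getElem?_eq_getElem hk, List.headD_eq_head?_getD]

-- B-side: zip of the drops is the window list
lemma zip_drops (m' : Nat) (l : List String) :
    pyZip "" ((List.range (m' + 1)).map (fun k => l.drop k)) = tgt (m' + 1) l := by
  induction l with
  | nil =>
      rw [List.range_succ_eq_map]
      simp [pyZip, pyZip1, tgt]
  | cons x xs ih =>
      rw [List.range_succ_eq_map]
      simp only [List.map_cons, List.map_map]
      show pyZip1 "" (x :: xs) ((List.range m').map (fun k => xs.drop k)) = _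
      unfold pyZip1
      by_cases h : m' ≤ xs.length
      · have hall : ((List.range m').map (fun k => xs.drop k)).all (fun l => !l.isEmpty) = true := by
          simp only [List.all_map, List.all_eq_true]
          intro k hk
          simp only [List.mem_range] at hk
          simp [List.drop_eq_nil_iff]
          omega
        rw [if_pos hall]
        have htails : ((List.range m').map (fun k => xs.drop k)).map List.tail
            = (List.range m').map (fun k => xs.drop (k + 1)) := by
          simp [List.map_map, Function.comp, List.tail_drop]
        have hpre : pyZip1 "" xs (((List.range m').map (fun k => xs.drop k)).map List.tail)
            = pyZip "" ((List.range (m' + 1)).map (fun k => xs.drop k)) := by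
          rw [htails, List.range_succ_eq_map]
          simp [pyZip, List.map_map, Function.comp_def, Nat.succ_eq_add_one]
        rw [hpre, ih]
        have hheads : ((List.range m').map (fun k => xs.drop k)).map (fun l => l.headD "")
            = xs.take m' := by
          rw [List.map_map]
          exact heads_of_drops xs m' h
        rw [hheads]
        -- tgt (m'+1) (x::xs) = (x :: xs.take m') :: tgt (m'+1) xs
        unfold tgt
        have hr : (x :: xs).length + 1 - (m' + 1) = (xs.length + 1 - (m' + 1)) + 1 := by
          simp; omega
        rw [hr, List.range_succ_eq_map]
        simp [List.map_map, Function.comp]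
      · have hne : ¬ ((List.range m').map (fun k => xs.drop k)).all (fun l => !l.isEmpty) = true := by
          simp only [List.all_map, List.all_eq_true]
          intro hc
          have := hc xs.length (by simp [List.mem_range]; omega)
          simp at this
        rw [if_neg hne]
        unfold tgt
        have : (x :: xs).length + 1 - (m' + 1) = 0 := by simp; omega
        rw [this]
        simp

-- A emits nothing when n ≤ 0 (the buffer's length is ≥ 1 at every test)
lemma A_nonpos (n : Int) (hn : n ≤ 0) (l : List String) :
    ∀ (acc : List (List String)) (g : List String),
      (l.foldl
        (fun (st : List (List String) × List String) x =>
          let ngram := st.2 ++ [x]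
          if (ngram.length : Int) = n then (st.1 ++ [ngram], ngram.drop 1) else (st.1, ngram))
        (acc, g)).1 = acc := by
  induction l with
  | nil => intro acc g; simp
  | cons x xs ih =>
      intro acc g
      simp only [List.foldl_cons]
      rw [if_neg (by simp; omega)]
      exact ih acc (g ++ [x])

-- ===== VERDICT (by name: the statement is the Claim_ definition above) =====
theorem simple_ngram_spec : Claim_equal_simple_ngram := by
  intro sequence n _
  unfold Spec_simple_ngram
  by_cases hn : n ≤ 0
  · have ha : simple_ngram sequence n = [] := by
      unfold simple_ngram
      rw [A_nonpos n hn sequence [] []]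
    have hb : simple_ngram_alt sequence n = [] := by
      show pyZip "" ((PySem.List.pyRange 0 (min n ((sequence.length : Int) + 1)) 1).map
        (fun i => PySem.List.slice sequence (some i) none)) = []
      rw [PySem.List.pyRange_one_eq_nil
        (show min n ((sequence.length : Int) + 1) ≤ 0 from by omega)]
      simp [pyZip]
    rw [ha, hb]
  · obtain ⟨m', hm'⟩ : ∃ m', n = ((m' + 1 : Nat) : Int) := ⟨(n - 1).toNat, by omega⟩
    subst hm'
    have halt : simple_ngram_alt sequence ((m' + 1 : Nat) : Int) = tgt (m' + 1) sequence := by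
      show pyZip "" ((PySem.List.pyRange 0
          (min ((m' + 1 : Nat) : Int) ((sequence.length : Int) + 1)) 1).map
        (fun i => PySem.List.slice sequence (some i) none)) = _
      by_cases hle : m' ≤ sequence.length
      · rw [show min ((m' + 1 : Nat) : Int) ((sequence.length : Int) + 1)
            = ((m' + 1 : Nat) : Int) from by push_cast; omega]
        rw [slices_eq_drops, zip_drops]
      · rw [show min ((m' + 1 : Nat) : Int) ((sequence.length : Int) + 1)
            = ((sequence.length + 1 : Nat) : Int) from by push_cast; omega]
        rw [slices_eq_drops, zip_drops]
        unfold tgt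
        rw [show sequence.length + 1 - (sequence.length + 1) = 0 from by omega,
            show sequence.length + 1 - (m' + 1) = 0 from by omega]
        simp
    rw [halt]
    exact congrArg Prod.fst (A_state (m' + 1) (by omega) sequence)
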